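-- pv_equiv track=rewrite | github.com/i960107/algorithm | goorm/AlgorithmMonday/뒤통수가따가워.py | solution
-- ===== SOURCE A (Python) =====
-- from typing import List
--
-- def solution(n: int, summits: List[int]) -> List[int]:
--     stack = []
--     answer = []
--
--     def pop_until_larger_element(value: int) -> int:
--         popped = 0
--         while stack and stack[-1] <= value:
--             stack.pop()
--             popped += 1
--         return popped
--
--     for s in summits:
--         answer.append(len(stack))
--         pop_until_larger_element(s)
--         stack.append(s)
--     return answer
-- ===== SOURCE B (Python) =====
-- from typing import List
--
-- def solution(n: int, summits: List[int]) -> List[int]: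
--     # For each i, count the strict running-max records when scanning the
--     # already-seen prefix backwards (most recent first); no stack is kept.
--     answer = []
--     for i in range(len(summits)):
--         cnt = 0
--         cur = None
--         for v in reversed(summits[:i]):
--             if cur is None or v > cur:
--                 cnt += 1
--                 cur = v
--         answer.append(cnt)
--     return answer
-- ===== Notes on version B (the rewrite author's own statement) =====
-- stated objective: alternative
-- what changed: Replaces the mutable monotonic stack with a stateless backward scan per index that counts strict running-max records of the preceding prefix.
import Mathlib
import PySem

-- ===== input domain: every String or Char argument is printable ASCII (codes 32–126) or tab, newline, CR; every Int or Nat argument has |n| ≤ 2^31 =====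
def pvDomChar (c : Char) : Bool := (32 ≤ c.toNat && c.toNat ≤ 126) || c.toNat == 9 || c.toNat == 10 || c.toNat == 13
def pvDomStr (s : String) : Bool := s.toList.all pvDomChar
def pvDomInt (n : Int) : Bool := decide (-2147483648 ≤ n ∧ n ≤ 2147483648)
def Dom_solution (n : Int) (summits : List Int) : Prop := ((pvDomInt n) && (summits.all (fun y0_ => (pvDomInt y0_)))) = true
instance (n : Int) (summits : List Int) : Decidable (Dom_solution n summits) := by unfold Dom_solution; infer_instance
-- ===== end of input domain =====

-- B replaces A's mutable monotonic stack with a stateless backward record-count scan per index (alternative decomposition, same return value).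

-- ===== PORT A =====
-- A's inner while loop: pop stack elements (top = list head here) while top <= value.
-- The Python helper also returns a popped-count, which the caller discards; only the stack matters.
def popUntilLarger (stack : List Int) (value : Int) : List Int :=
  match stack with
  | [] => []
  | t :: rest => if t ≤ value then popUntilLarger rest value else t :: rest

def solution (n : Int) (summits : List Int) : List Int :=
  (summits.foldl
    (fun (st : List Int × List Int) s =>
      (s :: popUntilLarger st.1 s, st.2 ++ [(st.1.length : Int)]))
    ([], [])).2

-- ===== PORT B =====
-- B's inner loop state: (cnt, cur) with cur = None before the first element.
def bStep (st : Int × Option Int) (v : Int) : Int × Option Int :=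
  match st.2 with
  | none => (st.1 + 1, some v)
  | some c => if v > c then (st.1 + 1, some v) else st

def solution_alt (n : Int) (summits : List Int) : List Int :=
  (List.range summits.length).map
    (fun i => (((summits.take i).reverse).foldl bStep (0, none)).1)

-- ===== PRECONDITION & SPEC =====
def Spec_solution (n : Int) (summits : List Int) (out : List Int) : Prop := out = solution_alt n summits
instance (n : Int) (summits : List Int) (out : List Int) : Decidable (Spec_solution n summits out) := by unfold Spec_solution; infer_instance

-- ===== CLAIM (what is proved, stated in full; the proofs are below) =====
def Claim_equal_solution : Prop := ∀ (n : Int) (summits : List Int), Dom_solution n summits → Spec_solution n summits (solution n summits)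

-- ===== LEMMAS AND PROOFS =====

-- strict running-max records of xs, given the current max (none = no element seen yet)
def recs (xs : List Int) (cur : Option Int) : List Int :=
  match xs with
  | [] => []
  | x :: r =>
    match cur with
    | none => x :: recs r (some x)
    | some c => if x > c then x :: recs r (some x) else recs r (some c)

theorem mem_recs_gt (xs : List Int) (a x : Int) (h : x ∈ recs xs (some a)) : a < x := by
  induction xs generalizing a with
  | nil => simp [recs] at h
  | cons y r ih =>
    simp only [recs] at h
    split at h
    · rcases List.mem_cons.1 h with h | h
      · omega
      · have := ih y h; omega
    · exact ih a h

theorem recs_filter_eq_self (r : List Int) (x a : Int) (hax : a < x) :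
    (recs r (some x)).filter (fun y => decide (a < y)) = recs r (some x) := by
  apply List.filter_eq_self.2
  intro y hy
  have := mem_recs_gt r x y hy
  simp; omega

theorem recs_filter_some (xs : List Int) (a : Int) :
    ∀ (c : Int), c ≤ a →
    recs xs (some a) = (recs xs (some c)).filter (fun x => decide (a < x)) := by
  induction xs with
  | nil => intro c _; simp [recs]
  | cons x r ih =>
    intro c hca
    simp only [recs]
    by_cases hxa : x > a
    · rw [if_pos hxa, if_pos (by omega : x > c)]
      simp only [List.filter_cons, decide_eq_true_eq]
      rw [if_pos hxa, recs_filter_eq_self r x a hxa]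
    · rw [if_neg hxa]
      by_cases hxc : x > c
      · rw [if_pos hxc]
        simp only [List.filter_cons, decide_eq_true_eq]
        rw [if_neg hxa]
        exact ih x (by omega)
      · rw [if_neg hxc]
        exact ih c hca

theorem recs_filter (xs : List Int) (a : Int) :
    recs xs (some a) = (recs xs none).filter (fun x => decide (a < x)) := by
  cases xs with
  | nil => simp [recs]
  | cons x r =>
    simp only [recs, List.filter_cons, decide_eq_true_eq]
    by_cases hxa : x > a
    · rw [if_pos hxa, if_pos hxa, recs_filter_eq_self r x a hxa]
    · rw [if_neg hxa, if_neg hxa]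
      exact recs_filter_some r a x (by omega)

theorem recs_pairwise (xs : List Int) (cur : Option Int) :
    (recs xs cur).Pairwise (· < ·) := by
  induction xs generalizing cur with
  | nil => simp [recs]
  | cons x r ih =>
    cases cur with
    | none =>
      simp only [recs]
      exact List.pairwise_cons.2 ⟨fun y hy => mem_recs_gt r x y hy, ih (some x)⟩
    | some c =>
      simp only [recs]
      split
      · exact List.pairwise_cons.2 ⟨fun y hy => mem_recs_gt r x y hy, ih (some x)⟩
      · exact ih (some c)

theorem popUntil_filter (l : List Int) (s : Int) (hl : l.Pairwise (· < ·)) :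
    popUntilLarger l s = l.filter (fun x => decide (s < x)) := by
  induction l with
  | nil => simp [popUntilLarger]
  | cons x r ih =>
    rcases List.pairwise_cons.1 hl with ⟨hall, hr⟩
    by_cases hxs : x ≤ s
    · simp only [popUntilLarger, if_pos hxs, List.filter_cons, decide_eq_true_eq]
      rw [if_neg (by omega)]
      exact ih hr
    · simp only [popUntilLarger, if_neg hxs, List.filter_cons, decide_eq_true_eq]
      rw [if_pos (by omega)]
      congr 1
      symm; apply List.filter_eq_self.2
      intro y hy; have := hall y hy; simp; omega

-- the stack A maintains after a prefix p equals the record list of p.reverse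
theorem stack_eq_recs (p : List Int) :
    (p.foldl (fun (st : List Int × List Int) s =>
      (s :: popUntilLarger st.1 s, st.2 ++ [(st.1.length : Int)])) ([], [])).1
    = recs p.reverse none := by
  induction p using List.reverseRecOn with
  | nil => simp [recs]
  | append_singleton q s ih =>
    rw [List.foldl_append]
    simp only [List.foldl_cons, List.foldl_nil, List.reverse_append, List.reverse_singleton,
      List.singleton_append]
    simp only [recs]
    rw [ih, recs_filter, popUntil_filter _ _ (recs_pairwise q.reverse none)]

-- B's inner fold counts the records
theorem bfold_count (xs : List Int) (cur : Option Int) (c : Int) :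
    (xs.foldl bStep (c, cur)).1 = c + (recs xs cur).length := by
  induction xs generalizing cur c with
  | nil => simp [recs]
  | cons x r ih =>
    cases cur with
    | none => simp only [List.foldl_cons, bStep, recs, List.length_cons]; rw [ih]; omega
    | some d =>
      simp only [List.foldl_cons, bStep, recs]
      by_cases h : x > d
      · rw [if_pos h, if_pos h]; simp only [List.length_cons]; rw [ih]; omega
      · rw [if_neg h, if_neg h]; exact ih _ _

-- A's answer accumulator, fully generalized
theorem answer_eq (p : List Int) :
    (p.foldl (fun (st : List Int × List Int) s =>
      (s :: popUntilLarger st.1 s, st.2 ++ [(st.1.length : Int)])) ([], [])).2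
    = (List.range p.length).map (fun i => ((recs (p.take i).reverse none).length : Int)) := by
  induction p using List.reverseRecOn with
  | nil => simp
  | append_singleton q s ih =>
    rw [List.foldl_append]
    simp only [List.foldl_cons, List.foldl_nil, List.length_append, List.length_singleton]
    rw [ih, stack_eq_recs]
    rw [List.range_succ, List.map_append, List.map_singleton]
    congr 1
    · apply List.map_congr_left
      intro i hi
      have hi' : i < q.length := List.mem_range.1 hi
      rw [List.take_append_of_le_length (by omega)]
    · rw [List.take_append_of_le_length (le_refl _), List.take_length]

-- ===== VERDICT (by name: the statement is the Claim_ definition above) =====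
theorem solution_spec : Claim_equal_solution := by
  intro n summits _
  unfold Spec_solution solution solution_alt
  rw [answer_eq]
  apply List.map_congr_left
  intro i _
  rw [bfold_count]
  simp
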